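-- pv_equiv track=rewrite | github.com/institutional-grammar-pl/policydemic | policydemic/crawler/utils.py | get_n_parents
-- ===== SOURCE A (Python) =====
-- def get_n_parents(parents, number_of_parents):
--     if parents is not None:
--         last_n_parents = []
--         parents_count = 0
--         while parents and parents_count < number_of_parents:
--             last_n_parents.append(parents.pop())
--             parents_count += 1
--         return last_n_parents
-- ===== SOURCE B (Python) =====
-- def get_n_parents(parents, number_of_parents):
--     if parents is not None:
--         n = max(0, min(number_of_parents, len(parents)))
--         result = parents[len(parents) - n:][::-1]
--         del parents[len(parents) - n:]
--         return result
-- ===== Notes on version B (the rewrite author's own statement) =====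
-- stated objective: simpler
-- what changed: Replaces the pop-one-at-a-time while loop and counter with a single clamped index computed up front, a reversed tail slice for the result, and one in-place slice deletion for the mutation.
import Mathlib
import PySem

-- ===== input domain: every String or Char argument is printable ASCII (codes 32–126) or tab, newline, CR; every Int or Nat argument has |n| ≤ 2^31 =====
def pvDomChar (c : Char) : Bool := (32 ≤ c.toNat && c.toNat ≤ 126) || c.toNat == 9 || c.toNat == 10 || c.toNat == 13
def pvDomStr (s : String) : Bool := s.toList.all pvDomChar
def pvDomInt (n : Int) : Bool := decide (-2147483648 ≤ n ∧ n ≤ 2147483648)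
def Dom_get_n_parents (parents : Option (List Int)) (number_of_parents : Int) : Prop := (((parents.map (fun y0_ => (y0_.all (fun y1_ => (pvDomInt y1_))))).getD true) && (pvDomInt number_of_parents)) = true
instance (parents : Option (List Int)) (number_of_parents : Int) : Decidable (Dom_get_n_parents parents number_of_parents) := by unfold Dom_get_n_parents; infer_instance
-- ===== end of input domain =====

-- B replaces A's pop-one-at-a-time loop with a clamped index + reversed tail slice (simpler);
-- both Pythons mutate `parents` in place identically; the equivalence proved is about the return value.

-- ===== PORT A =====
-- the while loop: state = (accumulated last_n_parents, remaining parents, parents_count);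
-- returns (last_n_parents, remaining parents)
def pvLoopA (ps acc : List Int) (count n : Int) : List Int × List Int :=
  if h : ps ≠ [] ∧ count < n then
    pvLoopA ps.dropLast (acc ++ [ps.getLast h.1]) (count + 1) n
  else (acc, ps)
termination_by ps.length
decreasing_by
  have := h.1
  cases ps with
  | nil => exact absurd rfl this
  | cons x xs => simp

def get_n_parents (parents : Option (List Int)) (number_of_parents : Int) : Option (List Int) :=
  match parents with
  | none => none
  | some ps => some (pvLoopA ps [] 0 number_of_parents).1

-- ===== PORT B =====
def get_n_parents_alt (parents : Option (List Int)) (number_of_parents : Int) : Option (List Int) :=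
  match parents with
  | none => none
  | some ps =>
    let n : Int := max 0 (min number_of_parents (ps.length : Int))
    -- parents[len(parents)-n:][::-1]
    some (PySem.List.slice ps (some ((ps.length : Int) - n)) none).reverse

-- ===== PRECONDITION & SPEC =====
def Spec_get_n_parents (parents : Option (List Int)) (number_of_parents : Int) (out : Option (List Int)) : Prop := out = get_n_parents_alt parents number_of_parents
instance (parents : Option (List Int)) (number_of_parents : Int) (out : Option (List Int)) : Decidable (Spec_get_n_parents parents number_of_parents out) := by unfold Spec_get_n_parents; infer_instance

-- ===== CLAIM (what is proved, stated in full; the proofs are below) =====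
def Claim_equal_get_n_parents : Prop := ∀ (parents : Option (List Int)) (number_of_parents : Int), Dom_get_n_parents parents number_of_parents → Spec_get_n_parents parents number_of_parents (get_n_parents parents number_of_parents)

-- ===== LEMMAS AND PROOFS =====

-- A's loop collects the last (n - count, clamped to [0, len]) elements, last first
theorem pvLoopA_eq (n : Int) (ps : List Int) : ∀ (acc : List Int) (c : Int),
    (pvLoopA ps acc c n).1 = acc ++ ps.reverse.take (min (n - c) (ps.length : Int)).toNat := by
  induction ps using List.reverseRecOn with
  | nil =>
    intro acc c
    rw [pvLoopA]
    simp
  | append_singleton qs a ih =>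
    intro acc c
    rw [pvLoopA]
    by_cases hc : c < n
    · have hne : qs ++ [a] ≠ [] := by simp
      rw [dif_pos ⟨hne, hc⟩]
      simp only [List.dropLast_concat, List.getLast_append_singleton] at *
      rw [ih]
      have hm : (min (n - c) ((qs ++ [a]).length : Int)).toNat
          = (min (n - (c + 1)) ((qs : List Int).length : Int)).toNat + 1 := by
        simp only [List.length_append, List.length_singleton]
        omega
      rw [hm]
      simp [List.take_succ_cons]
    · have : ¬ ((qs ++ [a]) ≠ [] ∧ c < n) := by tauto
      rw [dif_neg this]
      have h0 : (min (n - c) (((qs ++ [a]).length : Nat) : Int)).toNat = 0 := by omega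
      rw [h0]
      simp

theorem get_n_parents_eq_alt (parents : Option (List Int)) (number_of_parents : Int) :
    get_n_parents parents number_of_parents = get_n_parents_alt parents number_of_parents := by
  cases parents with
  | none => rfl
  | some ps =>
    simp only [get_n_parents, get_n_parents_alt]
    rw [pvLoopA_eq]
    set n : Int := max 0 (min number_of_parents (ps.length : Int)) with hn
    have h0 : 0 ≤ (ps.length : Int) - n := by omega
    rw [PySem.List.slice_from _ h0, List.reverse_drop]
    have harg : ((ps.length : Int) - n).toNat = ps.length - (min (number_of_parents - 0) ((ps.length : Nat) : Int)).toNat := by omega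
    rw [harg]
    simp
    omega

-- ===== VERDICT (by name: the statement is the Claim_ definition above) =====
theorem get_n_parents_spec : Claim_equal_get_n_parents := by
  intro parents number_of_parents _
  unfold Spec_get_n_parents
  exact get_n_parents_eq_alt parents number_of_parents
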